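-- pv_equiv track=rewrite | github.com/kingfly55/skill-drilla | src/skill_drilla/notebooks/loaders.py | recurrence_snapshot
-- ===== SOURCE A (Python) =====
-- from typing import Any, Iterable, Iterator
--
-- def recurrence_snapshot(records: Iterable[dict[str, Any]]) -> dict[str, int]:
--     evidence_ids: set[str] = set()
--     project_ids: set[str] = set()
--     session_ids: set[str] = set()
--     raw_occurrences = 0
--     for row in records:
--         raw_occurrences += 1
--         evidence_id = row.get("evidence_id")
--         if evidence_id is not None:
--             evidence_ids.add(str(evidence_id))
--         project_id = row.get("project_id")
--         if project_id is not None: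
--             project_ids.add(str(project_id))
--         session_id = row.get("session_id")
--         if session_id is not None:
--             session_ids.add(str(session_id))
--     return {
--         "raw_occurrences": raw_occurrences,
--         "distinct_evidence": len(evidence_ids),
--         "distinct_projects": len(project_ids),
--         "distinct_sessions": len(session_ids),
--     }
-- ===== SOURCE B (Python) =====
-- from typing import Any, Iterable
--
-- def recurrence_snapshot(records: Iterable[dict[str, Any]]) -> dict[str, int]:
--     rows = list(records)
--
--     def _distinct(key: str) -> int:
--         vals = sorted(str(r.get(key)) for r in rows if r.get(key) is not None)
--         if not vals:
--             return 0
--         runs = 1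
--         for prev, cur in zip(vals, vals[1:]):
--             if prev != cur:
--                 runs += 1
--         return runs
--
--     return {
--         "raw_occurrences": len(rows),
--         "distinct_evidence": _distinct("evidence_id"),
--         "distinct_projects": _distinct("project_id"),
--         "distinct_sessions": _distinct("session_id"),
--     }
-- ===== Notes on version B (the rewrite author's own statement) =====
-- stated objective: alternative
-- what changed: Replaces A's hash-set accumulation (three mutable sets maintained in one fused loop) with a sort-then-scan algorithm: per key the non-None ids are collected, sorted, and the distinct count is obtained by counting runs of unequal adjacent elements in the sorted list; no set is ever built.
import Mathlib
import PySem

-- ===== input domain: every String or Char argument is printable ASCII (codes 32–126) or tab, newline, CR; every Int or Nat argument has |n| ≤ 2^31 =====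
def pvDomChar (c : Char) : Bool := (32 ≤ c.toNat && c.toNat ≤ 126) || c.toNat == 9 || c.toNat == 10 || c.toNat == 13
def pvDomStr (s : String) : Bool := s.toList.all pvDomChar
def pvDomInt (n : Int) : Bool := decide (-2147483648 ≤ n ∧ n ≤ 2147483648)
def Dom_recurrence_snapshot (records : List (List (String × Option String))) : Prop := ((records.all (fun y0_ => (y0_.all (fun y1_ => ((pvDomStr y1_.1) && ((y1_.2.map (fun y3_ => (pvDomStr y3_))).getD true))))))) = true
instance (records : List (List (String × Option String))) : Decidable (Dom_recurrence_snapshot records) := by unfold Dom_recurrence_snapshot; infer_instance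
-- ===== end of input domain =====

-- B replaces A's fused hash-set accumulation with a sort-then-scan algorithm: per key the
-- non-None ids are sorted and the distinct count is the number of runs of equal adjacent
-- elements; objective: alternative (no set structure, O(n log n) instead of O(n)).

-- ===== PORT A =====
-- row.get(k): the dict value is Option String, so Python's `row.get(k)` flattens to `.join`;
-- str() on a str is the identity, so `add (str v)` is `Set.add s v`.
def pvGetId (row : List (String × Option String)) (k : String) : Option String :=
  ((PySem.Dict.mk row).get? k).join

def pvStepA (st : PySem.Set String × PySem.Set String × PySem.Set String × Int)
    (row : List (String × Option String)) :
    PySem.Set String × PySem.Set String × PySem.Set String × Int :=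
  let raw := st.2.2.2 + 1
  let ev := match pvGetId row "evidence_id" with
    | some v => PySem.Set.add st.1 v
    | none => st.1
  let pr := match pvGetId row "project_id" with
    | some v => PySem.Set.add st.2.1 v
    | none => st.2.1
  let se := match pvGetId row "session_id" with
    | some v => PySem.Set.add st.2.2.1 v
    | none => st.2.2.1
  (ev, pr, se, raw)

def recurrence_snapshot (records : List (List (String × Option String))) : List (String × Int) :=
  let st := records.foldl pvStepA (PySem.Set.empty, PySem.Set.empty, PySem.Set.empty, 0)
  [("raw_occurrences", st.2.2.2),
   ("distinct_evidence", (PySem.Set.len st.1 : Int)),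
   ("distinct_projects", (PySem.Set.len st.2.1 : Int)),
   ("distinct_sessions", (PySem.Set.len st.2.2.1 : Int))]

-- ===== PORT B =====
-- sorted non-None ids for one key (the generator feeding Python's sorted())
def pvVals (rows : List (List (String × Option String))) (k : String) : List String :=
  rows.filterMap (fun r => pvGetId r k)

-- `if not vals: return 0` / `runs = 1; for prev, cur in zip(vals, vals[1:]): if prev != cur: runs += 1`
def pvRuns (vals : List String) : Int :=
  match vals with
  | [] => 0
  | _ :: _ => (vals.zip vals.tail).foldl
      (fun runs p => if p.1 ≠ p.2 then runs + 1 else runs) 1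

def pvDistinctB (rows : List (List (String × Option String))) (k : String) : Int :=
  pvRuns (PySem.List.sorted (pvVals rows k) (fun x => x) false)

def recurrence_snapshot_alt (records : List (List (String × Option String))) : List (String × Int) :=
  let rows := records
  [("raw_occurrences", (rows.length : Int)),
   ("distinct_evidence", pvDistinctB rows "evidence_id"),
   ("distinct_projects", pvDistinctB rows "project_id"),
   ("distinct_sessions", pvDistinctB rows "session_id")]

-- ===== PRECONDITION & SPEC =====
def Spec_recurrence_snapshot (records : List (List (String × Option String))) (out : List (String × Int)) : Prop := out = recurrence_snapshot_alt records
instance (records : List (List (String × Option String))) (out : List (String × Int)) : Decidable (Spec_recurrence_snapshot records out) := by unfold Spec_recurrence_snapshot; infer_instance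

-- ===== CLAIM (what is proved, stated in full; the proofs are below) =====
def Claim_equal_recurrence_snapshot : Prop := ∀ (records : List (List (String × Option String))), Dom_recurrence_snapshot records → Spec_recurrence_snapshot records (recurrence_snapshot records)

-- ===== LEMMAS AND PROOFS =====

def pvStep1 (k : String) (s : PySem.Set String) (row : List (String × Option String)) :
    PySem.Set String :=
  match pvGetId row k with
  | some v => PySem.Set.add s v
  | none => s

-- A's fused fold splits into four independent folds
theorem pvFoldA_split (records : List (List (String × Option String)))
    (e p s : PySem.Set String) (n : Int) :
    records.foldl pvStepA (e, p, s, n) =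
      (records.foldl (pvStep1 "evidence_id") e,
       records.foldl (pvStep1 "project_id") p,
       records.foldl (pvStep1 "session_id") s,
       n + records.length) := by
  induction records generalizing e p s n with
  | nil => simp
  | cons r rs ih =>
    simp only [List.foldl_cons, List.length_cons]
    rw [ih]
    simp [pvStepA, pvStep1]
    omega

-- conditional accumulation of one key = the set of that key's non-None values
theorem pvFold1_filterMap (k : String) (records : List (List (String × Option String)))
    (s : PySem.Set String) :
    records.foldl (pvStep1 k) s =
      (records.filterMap (fun r => pvGetId r k)).foldl PySem.Set.add s := by
  induction records generalizing s with
  | nil => rfl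
  | cons r rs ih =>
    simp only [List.foldl_cons, List.filterMap_cons]
    cases h : pvGetId r k with
    | none => simp [pvStep1, h, ih]
    | some v => simp [pvStep1, h, ih]

theorem pvComponent (k : String) (records : List (List (String × Option String))) :
    records.foldl (pvStep1 k) PySem.Set.empty =
      PySem.Set.ofList (pvVals records k) := by
  rw [pvFold1_filterMap, PySem.Set.ofList_eq_foldl]
  rfl

-- the B-side loop is 1 + (number of unequal adjacent pairs)
theorem pvRunsFold (l : List (String × String)) (n : Int) :
    l.foldl (fun runs p => if p.1 ≠ p.2 then runs + 1 else runs) n =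
      n + (l.countP (fun p => p.1 ≠ p.2) : Int) := by
  induction l generalizing n with
  | nil => simp
  | cons x t ih =>
    simp only [List.foldl_cons, List.countP_cons, ih]
    by_cases h : x.1 = x.2
    · simp [h]
    · simp [h]; ring

-- in a ≤-sorted list the number of runs equals the number of distinct elements
theorem pvRuns_card (l : List String) (hp : l.Pairwise (· ≤ ·)) :
    pvRuns l = (l.toFinset.card : Int) := by
  induction l with
  | nil => simp [pvRuns]
  | cons a t ih =>
    cases t with
    | nil => simp [pvRuns]
    | cons b t' =>
      have hp' : (b :: t').Pairwise (· ≤ ·) := hp.of_cons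
      have ih' := ih hp'
      simp only [pvRuns, List.zip_cons_cons, List.tail_cons, List.foldl_cons, pvRunsFold] at ih' ⊢
      by_cases hab : a = b
      · have hfs : (a :: b :: t').toFinset = (b :: t').toFinset := by
          subst hab; simp
        rw [hfs, if_neg (by simp [hab])]
        omega
      · have hnotmem : a ∉ b :: t' := by
          intro hmem
          have hab' : a ≤ b := (List.pairwise_cons.mp hp).1 b (by simp)
          rcases List.mem_cons.mp hmem with h | h
          · exact hab h
          · have hbx : b ≤ a := (List.pairwise_cons.mp hp').1 a h
            exact hab (le_antisymm hab' hbx)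
        have hcard : (a :: b :: t').toFinset.card = (b :: t').toFinset.card + 1 := by
          simp only [List.toFinset_cons]
          rw [Finset.card_insert_of_notMem (by simpa using hnotmem)]
        rw [hcard, if_pos (by simpa using hab)]
        push_cast
        omega

theorem pvDistinct_eq (xs : List String) :
    pvRuns (PySem.List.sorted xs (fun x => x) false) =
      (PySem.Set.len (PySem.Set.ofList xs) : Int) := by
  have hs : (PySem.List.sorted xs (fun x => x) false).Pairwise (· ≤ ·) :=
    PySem.List.sorted_pairwise (xs := xs) (key := fun x => x)
  rw [pvRuns_card _ hs]
  have hperm : (PySem.List.sorted xs (fun x => x) false).Perm xs :=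
    PySem.List.sorted_perm ..
  rw [List.toFinset_eq_of_perm _ _ hperm]
  have h1 : PySem.Set.ofList xs = PySem.List.dedup xs :=
    (PySem.List.dedup_eq_ofList xs).symm
  have h2 : (PySem.List.dedup xs).toFinset = xs.toFinset := by
    ext y; simp
  have h3 : (PySem.List.dedup xs).toFinset.card = (PySem.List.dedup xs).length :=
    List.toFinset_card_of_nodup (PySem.List.nodup_dedup xs)
  have h4 : PySem.Set.len (PySem.Set.ofList xs) = xs.toFinset.card := by
    rw [h1, ← h2, h3]; rfl
  rw [h4]

-- ===== VERDICT (by name: the statement is the Claim_ definition above) =====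
theorem recurrence_snapshot_spec : Claim_equal_recurrence_snapshot := by
  intro records _
  show recurrence_snapshot records = recurrence_snapshot_alt records
  simp only [recurrence_snapshot, recurrence_snapshot_alt, pvDistinctB,
    pvFoldA_split, pvComponent, pvDistinct_eq]
  norm_num
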